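-- pv_equiv track=rewrite | github.com/HiteshAdari/DSApractice | CP/CC57DIV3.PY | delic
-- ===== SOURCE A (Python) =====
-- def delic(m,p,k):
--     stk = []
--     has = set()
--     for i,num in enumerate(m):
--         if num%p == 0:
--             has.add(i)
--             stk.append(num)
--
--     delica = 0
--     if min(has) >=k:
--         for j in range(k):
--             delica += m[j]
--     else:
--         stk = sorted(stk)
--         for j in range(k):
--             if j in has:
--                 delica += stk.pop()
--             else:delica += m[j]
--     return delica
-- ===== SOURCE B (Python) =====
-- def delic(m, p, k):
--     # selection instead of sorting: scan the remaining divisible pool for its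
--     # maximum at each divisible position of the first k slots
--     pool = [v for v in m if v % p == 0]
--     ans = 0
--     for j in range(k):
--         if m[j] % p == 0:
--             best = max(pool)
--             pool.remove(best)
--             ans += best
--         else:
--             ans += m[j]
--     return ans
-- ===== Notes on version B (the rewrite author's own statement) =====
-- stated objective: alternative
-- what changed: Replaces A's sort-then-pop machinery (index set, min-based branch split, sorted stack) by a sort-free selection loop: build the divisible pool once and, at each divisible position among the first k slots, scan the pool for its maximum and remove it.
import Mathlib
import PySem

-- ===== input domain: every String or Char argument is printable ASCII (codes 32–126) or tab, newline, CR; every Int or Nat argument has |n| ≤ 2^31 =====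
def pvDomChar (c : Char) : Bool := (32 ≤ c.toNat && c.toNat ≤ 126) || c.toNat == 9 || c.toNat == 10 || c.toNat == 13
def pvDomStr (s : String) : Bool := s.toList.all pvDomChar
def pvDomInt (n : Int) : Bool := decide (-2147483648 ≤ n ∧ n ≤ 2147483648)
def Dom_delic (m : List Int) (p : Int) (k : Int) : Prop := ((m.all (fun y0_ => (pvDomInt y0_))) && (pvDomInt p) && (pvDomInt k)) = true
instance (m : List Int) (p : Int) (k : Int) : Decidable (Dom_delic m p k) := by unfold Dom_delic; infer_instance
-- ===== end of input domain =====

-- B replaces A's sort-then-pop machinery by a sort-free selection loop (repeated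
-- max-scan-and-remove over the divisible pool); objective: alternative algorithm.

-- ===== PORT A =====
def delic (m : List Int) (p : Int) (k : Int) : Int :=
  let sh : List Int × PySem.Set Int :=
    (PySem.List.enumerate m).foldl
      (fun (st : List Int × PySem.Set Int) iv =>
        if PySem.Int.mod iv.2 p == 0 then (st.1 ++ [iv.2], st.2.add iv.1) else st)
      ([], [])
  -- min(has); the `none` case (min(set()) raises ValueError in Python) is excluded by Pre_delic
  (PySem.List.min? sh.2 (fun x => x)).elim 0 (fun mn =>
    if mn ≥ k then
      (PySem.List.pyRange 0 k).foldl (fun d j => d + PySem.List.pyGetD m j 0) 0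
    else
      ((PySem.List.pyRange 0 k).foldl
        (fun (st : Int × List Int) j =>
          if PySem.Set.contains sh.2 j then
            -- stk.pop(); the `none` (empty-stack IndexError) case is unreachable under Pre_delic
            (PySem.List.pop? st.2).elim st (fun vr => (st.1 + vr.1, vr.2))
          else (st.1 + PySem.List.pyGetD m j 0, st.2))
        (0, PySem.List.sorted sh.1 (fun x => x) false)).1)

-- ===== PORT B =====
def delic_alt (m : List Int) (p : Int) (k : Int) : Int :=
  ((PySem.List.pyRange 0 k).foldl
    (fun (st : Int × List Int) j =>
      if PySem.Int.mod (PySem.List.pyGetD m j 0) p == 0 then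
        -- max(pool); the `none` case (max([]) raises ValueError) is unreachable under Pre_delic
        (PySem.List.max? st.2 (fun x => x)).elim st
          (fun best => (st.1 + best, (PySem.List.remove? st.2 best).getD st.2))
      else (st.1 + PySem.List.pyGetD m j 0, st.2))
    (0, m.filter (fun v => PySem.Int.mod v p == 0))).1

-- ===== PRECONDITION & SPEC =====
-- Pre_ excludes exactly the inputs where Python A raises: p = 0 (ZeroDivisionError),
-- k > len(m) (IndexError on m[j]), and "no element divisible by p" (ValueError on min(set())).
def Pre_delic (m : List Int) (p : Int) (k : Int) : Prop :=
  p ≠ 0 ∧ k ≤ (m.length : Int) ∧ ∃ x ∈ m, PySem.Int.mod x p = 0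
instance (m : List Int) (p : Int) (k : Int) : Decidable (Pre_delic m p k) := by
  unfold Pre_delic; infer_instance
def pvWitness_delic : List Int × Int × Int := ([2, 3], 2, 1)

def Spec_delic (m : List Int) (p : Int) (k : Int) (out : Int) : Prop := out = delic_alt m p k
instance (m : List Int) (p : Int) (k : Int) (out : Int) : Decidable (Spec_delic m p k out) := by
  unfold Spec_delic; infer_instance

-- ===== CLAIM (what is proved, stated in full; the proofs are below) =====
def Claim_equal_delic : Prop := ∀ (m : List Int) (p : Int) (k : Int),
  Dom_delic m p k → Pre_delic m p k → Spec_delic m p k (delic m p k)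

-- ===== LEMMAS AND PROOFS =====

-- the indices of the divisible elements, in order (the contents of A's `has`)
def Dix (m : List Int) (p : Int) : List Int :=
  (PySem.List.pyRange 0 (PySem.List.len m)).filter
    (fun j => PySem.Int.mod (PySem.List.pyGetD m j 0) p == 0)

-- A's build loop produces (the divisible values, the divisible indices)
lemma buildA (p : Int) : ∀ (xs : List Int) (s0 : Int) (stk0 : List Int) (has0 : PySem.Set Int),
    (∀ x ∈ has0, x < s0) →
    (PySem.List.enumerate xs s0).foldl
      (fun (st : List Int × PySem.Set Int) iv =>
        if PySem.Int.mod iv.2 p == 0 then (st.1 ++ [iv.2], st.2.add iv.1) else st)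
      (stk0, has0)
    = (stk0 ++ xs.filter (fun v => PySem.Int.mod v p == 0),
       has0 ++ ((PySem.List.enumerate xs s0).filter (fun iv => PySem.Int.mod iv.2 p == 0)).map (·.1)) := by
  intro xs
  induction xs with
  | nil => intro s0 stk0 has0 _; simp [PySem.List.enumerate_nil]
  | cons x t ih =>
    intro s0 stk0 has0 hlt
    rw [PySem.List.enumerate_cons]
    by_cases hx : PySem.Int.mod x p == 0
    · have hnm : s0 ∉ has0 := fun hmem => absurd (hlt _ hmem) (by omega)
      simp only [List.foldl_cons, hx, if_true]
      rw [PySem.Set.add_of_not_mem hnm,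
          ih (s0+1) (stk0 ++ [x]) (has0 ++ [s0])
            (by intro y hy; rcases List.mem_append.1 hy with h | h
                · exact lt_trans (hlt _ h) (by omega)
                · simp at h; omega)]
      simp [hx, List.append_assoc]
    · simp only [List.foldl_cons, hx, Bool.false_eq_true, if_false]
      rw [ih (s0 + 1) stk0 has0 (fun y hy => lt_trans (hlt y hy) (by omega))]
      simp [hx]

lemma hasD (m : List Int) (p : Int) :
    ((PySem.List.enumerate m).filter (fun iv => PySem.Int.mod iv.2 p == 0)).map (·.1)
    = Dix m p := by
  rw [PySem.List.enumerate_eq_map_pyRange m 0, List.filter_map, List.map_map, Dix]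
  simp [Function.comp_def]

lemma mem_Dix (m : List Int) (p : Int) (j : Int) :
    j ∈ Dix m p ↔ (0 ≤ j ∧ j < (m.length : Int) ∧ PySem.Int.mod (PySem.List.pyGetD m j 0) p = 0) := by
  simp [Dix, List.mem_filter, PySem.List.mem_pyRange_one]
  tauto

-- erasing the maximum from a list = dropping the last element of its sorted order
lemma sorted_erase_max (S : List Int) (mx : Int) (hmem : mx ∈ S) (hmax : ∀ y ∈ S, y ≤ mx) :
    PySem.List.sorted (S.erase mx) (fun x => x) false
    = (PySem.List.sorted S (fun x => x) false).dropLast := by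
  have hperm : (PySem.List.sorted S (fun x => x) false).Perm S :=
    PySem.List.sorted_perm S (fun x => x) false
  have hpw : (PySem.List.sorted S (fun x => x) false).Pairwise (fun a b => a ≤ b) := by
    have := PySem.List.sorted_pairwise S (fun x => x)
    simpa using this
  have hLne : PySem.List.sorted S (fun x => x) false ≠ [] := by
    intro e
    rw [PySem.List.sorted_eq_nil_iff] at e
    subst e; exact absurd hmem (List.not_mem_nil)
  have hlast : (PySem.List.sorted S (fun x => x) false).getLast hLne = mx := by
    apply le_antisymm
    · exact hmax _ (hperm.mem_iff.1 (List.getLast_mem hLne))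
    · obtain ⟨i, hi, hEq⟩ := List.mem_iff_getElem.1 (hperm.mem_iff.2 hmem)
      rw [List.getLast_eq_getElem]
      calc mx = (PySem.List.sorted S (fun x => x) false)[i] := hEq.symm
        _ ≤ _ := PySem.List.sorted_id_getElem_mono S (p := i)
              (q := (PySem.List.sorted S (fun x => x) false).length - 1) (by omega) (by omega)
  have hsplit : PySem.List.sorted S (fun x => x) false
      = (PySem.List.sorted S (fun x => x) false).dropLast ++ [mx] := by
    conv_lhs => rw [← List.dropLast_append_getLast hLne]
    rw [hlast]
  apply PySem.List.sorted_id_eq_of_perm_of_pairwise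
  · have p1 : S.Perm (mx :: S.erase mx) := List.perm_cons_erase hmem
    have p2 : (PySem.List.sorted S (fun x => x) false).Perm
        (mx :: (PySem.List.sorted S (fun x => x) false).dropLast) := by
      conv_lhs => rw [hsplit]
      exact List.perm_append_comm
    exact (p2.symm.trans (hperm.trans p1)).cons_inv
  · exact hpw.sublist (List.dropLast_sublist _)

-- A's interleaved pop loop: the non-divisible positions contribute their value, the
-- divisible ones pop (and sum) the largest still-available elements of s
lemma popLoop (g : Int → Bool) (val : Int → Int) :
    ∀ (js : List Int) (s : List Int) (acc : Int),
    js.countP g ≤ s.length →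
    (js.foldl
      (fun (st : Int × List Int) j =>
        if g j then (PySem.List.pop? st.2).elim st (fun vr => (st.1 + vr.1, vr.2))
        else (st.1 + val j, st.2)) (acc, s)).1
    = acc + ((js.filter (fun j => !g j)).map val).sum
        + (s.drop (s.length - js.countP g)).sum := by
  intro js
  induction js with
  | nil => intro s acc _; simp
  | cons j t ih =>
    intro s acc h
    by_cases hg : g j
    · have hc : (j :: t).countP g = t.countP g + 1 := by simp [hg]
      have hs : s ≠ [] := by
        intro e; subst e
        rw [List.countP_cons, if_pos hg] at h
        simp at h
      obtain ⟨tS, x, rfl⟩ : ∃ tS x, s = tS ++ [x] :=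
        ⟨s.dropLast, s.getLast hs, (List.dropLast_append_getLast hs).symm⟩
      have hlen : (tS ++ [x]).length = tS.length + 1 := by simp
      have hle : t.countP g ≤ tS.length := by rw [hc, hlen] at h; omega
      simp only [List.foldl_cons, hg, if_true, PySem.List.pop?_last, Option.elim_some]
      rw [ih tS (acc + x) hle, hc, hlen]
      have hd : tS.length + 1 - (t.countP g + 1) = tS.length - t.countP g := by omega
      rw [hd, List.drop_append_of_le_length (by omega)]
      simp [hg]
      ring
    · simp only [List.foldl_cons, hg, Bool.false_eq_true, if_false]
      rw [List.countP_cons, if_neg hg] at h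
      rw [ih s (acc + val j) (by simpa using h)]
      simp [hg]
      ring

-- B's selection loop: the non-divisible positions contribute their value, the divisible
-- ones extract (and sum) the maxima of the pool = the largest elements of its sorted order
lemma maxLoop (g : Int → Bool) (val : Int → Int) :
    ∀ (js : List Int) (S : List Int) (acc : Int),
    js.countP g ≤ S.length →
    (js.foldl
      (fun (st : Int × List Int) j =>
        if g j then
          (PySem.List.max? st.2 (fun x => x)).elim st
            (fun best => (st.1 + best, (PySem.List.remove? st.2 best).getD st.2))
        else (st.1 + val j, st.2)) (acc, S)).1
    = acc + ((js.filter (fun j => !g j)).map val).sum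
        + ((PySem.List.sorted S (fun x => x) false).drop (S.length - js.countP g)).sum := by
  intro js
  induction js with
  | nil =>
    intro S acc _
    simp only [List.foldl_nil, List.countP_nil, List.filter_nil, List.map_nil, List.sum_nil,
      add_zero, Nat.sub_zero]
    rw [← PySem.List.length_sorted S (fun x => x) false, List.drop_length]
    simp
  | cons j t ih =>
    intro S acc h
    by_cases hg : g j
    · have hc : (j :: t).countP g = t.countP g + 1 := by simp [hg]
      have hS : S ≠ [] := by
        intro e; subst e; rw [hc] at h; simp at h
      obtain ⟨mx, hmx⟩ : ∃ mx, PySem.List.max? S (fun x => x) = some mx := by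
        rcases hm : PySem.List.max? S (fun x => x) with _ | mx
        · exact absurd ((PySem.List.max?_eq_none_iff S (fun x => x)).1 hm) hS
        · exact ⟨mx, rfl⟩
      have hmem := PySem.List.max?_mem hmx
      have hmax : ∀ y ∈ S, y ≤ mx := by
        have := PySem.List.max?_isMax hmx
        simpa using this
      have hS1 : 1 ≤ S.length := List.length_pos_iff.2 hS
      simp only [List.foldl_cons, hg, if_true, hmx, Option.elim_some]
      rw [PySem.List.remove?_eq_some_erase S mx hmem, Option.getD_some]
      have hlen : (S.erase mx).length = S.length - 1 := List.length_erase_of_mem hmem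
      rw [ih (S.erase mx) (acc + mx) (by rw [hlen]; rw [hc] at h; omega)]
      rw [hc, hlen, sorted_erase_max S mx hmem hmax]
      have hfl : (j :: t).filter (fun x => !g x) = t.filter (fun x => !g x) := by simp [hg]
      rw [hfl]
      have hd : S.length - 1 - t.countP g = S.length - (t.countP g + 1) := by omega
      have hdrop : (PySem.List.sorted S (fun x => x) false).drop (S.length - (t.countP g + 1))
          = (PySem.List.sorted S (fun x => x) false).dropLast.drop (S.length - (t.countP g + 1))
            ++ [mx] := by
        have hperm : (PySem.List.sorted S (fun x => x) false).Perm S :=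
          PySem.List.sorted_perm S (fun x => x) false
        have hpw : (PySem.List.sorted S (fun x => x) false).Pairwise (fun a b => a ≤ b) := by
          have := PySem.List.sorted_pairwise S (fun x => x)
          simpa using this
        have hLne : PySem.List.sorted S (fun x => x) false ≠ [] := by
          intro e
          rw [PySem.List.sorted_eq_nil_iff] at e
          exact hS e
        have hlast : (PySem.List.sorted S (fun x => x) false).getLast hLne = mx := by
          apply le_antisymm
          · exact hmax _ (hperm.mem_iff.1 (List.getLast_mem hLne))
          · obtain ⟨i, hi, hEq⟩ := List.mem_iff_getElem.1 (hperm.mem_iff.2 hmem)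
            rw [List.getLast_eq_getElem]
            calc mx = (PySem.List.sorted S (fun x => x) false)[i] := hEq.symm
              _ ≤ _ := PySem.List.sorted_id_getElem_mono S (p := i)
                    (q := (PySem.List.sorted S (fun x => x) false).length - 1) (by omega) (by omega)
        conv_lhs => rw [← List.dropLast_append_getLast hLne, hlast]
        rw [List.drop_append_of_le_length
          (by rw [List.length_dropLast, PySem.List.length_sorted]; omega)]
      rw [hd, hdrop, List.sum_append]
      simp
      ring
    · simp only [List.foldl_cons, hg, Bool.false_eq_true, if_false]
      rw [List.countP_cons, if_neg hg] at h
      rw [ih S (acc + val j) (by simpa using h)]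
      simp [hg]
      ring

theorem delic_spec : Claim_equal_delic := by
  intro m p k _ hPre
  obtain ⟨hp, hk, x, hxm, hx⟩ := hPre
  simp only [Spec_delic, delic, delic_alt]
  rw [buildA p m 0 [] [] (by intro y hy; simp at hy)]
  simp only [List.nil_append]
  rw [hasD]
  rcases hmin : PySem.List.min? (Dix m p) (fun x => x) with _ | mn
  · exfalso
    obtain ⟨i, hilt, hEq⟩ := List.mem_iff_getElem.1 hxm
    have hmem : (i : Int) ∈ Dix m p := by
      rw [mem_Dix]
      refine ⟨by omega, by exact_mod_cast hilt, ?_⟩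
      rw [PySem.List.pyGetD_natCast, List.getD_eq_getElem _ _ hilt, hEq]
      exact hx
    rw [PySem.List.min?_eq_none_iff] at hmin
    rw [hmin] at hmem
    exact absurd hmem (List.not_mem_nil)
  · simp only [Option.elim_some]
    have hmem := PySem.List.min?_mem hmin
    obtain ⟨hmn0, hmnlt, hmndv⟩ := (mem_Dix m p mn).1 hmem
    have hminle := PySem.List.min?_isMin hmin
    split_ifs with hge
    · -- min(has) >= k: nothing in the first k positions is divisible
      have hnone : ∀ j ∈ PySem.List.pyRange 0 k,
          (PySem.Int.mod (PySem.List.pyGetD m j 0) p == 0) = false := by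
        intro j hj
        rw [PySem.List.mem_pyRange_one] at hj
        by_contra hb
        rw [Bool.not_eq_false, beq_iff_eq] at hb
        have hjD : j ∈ Dix m p := (mem_Dix m p j).2 ⟨hj.1, by omega, hb⟩
        have := hminle j hjD
        simp only at this
        omega
      have hcz : (PySem.List.pyRange 0 k).countP
          (fun j => PySem.Int.mod (PySem.List.pyGetD m j 0) p == 0) = 0 :=
        List.countP_eq_zero.2 (fun j hj => by simp [hnone j hj])
      refine Eq.trans ?_ (maxLoop (fun j => PySem.Int.mod (PySem.List.pyGetD m j 0) p == 0)
        (fun j => PySem.List.pyGetD m j 0) (PySem.List.pyRange 0 k)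
        (m.filter (fun v => PySem.Int.mod v p == 0)) 0 (by rw [hcz]; omega)).symm
      have hfr : (PySem.List.pyRange 0 k).filter
            (fun j => !(PySem.Int.mod (PySem.List.pyGetD m j 0) p == 0))
          = PySem.List.pyRange 0 k :=
        List.filter_eq_self.2 (fun j hj => by simp [hnone j hj])
      rw [PySem.List.foldl_add, hcz, hfr, Nat.sub_zero,
          ← PySem.List.length_sorted (m.filter (fun v => PySem.Int.mod v p == 0))
            (fun x => x) false, List.drop_length]
      simp
    · -- min(has) < k: the interleaved pop loop vs the selection loop
      have hk0 : (0 : Int) < k := by omega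
      have hgq : ∀ j ∈ PySem.List.pyRange 0 k,
          (PySem.Set.contains (Dix m p) j)
            = (PySem.Int.mod (PySem.List.pyGetD m j 0) p == 0) := by
        intro j hj
        rw [PySem.List.mem_pyRange_one] at hj
        apply Bool.eq_iff_iff.2
        rw [PySem.Set.contains_iff, beq_iff_eq, mem_Dix]
        constructor
        · exact fun h => h.2.2
        · intro h; exact ⟨hj.1, by omega, h⟩
      have hcg : (PySem.List.pyRange 0 k).countP (fun j => PySem.Set.contains (Dix m p) j)
          = (PySem.List.pyRange 0 k).countP
              (fun j => PySem.Int.mod (PySem.List.pyGetD m j 0) p == 0) := by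
        rw [List.countP_eq_length_filter, List.countP_eq_length_filter,
            List.filter_congr hgq]
      have hLD : (Dix m p).length = (m.filter (fun v => PySem.Int.mod v p == 0)).length := by
        have : (Dix m p).map (fun j => PySem.List.pyGetD m j 0)
            = m.filter (fun v => PySem.Int.mod v p == 0) := by
          conv_rhs => rw [← PySem.List.map_pyGetD_pyRange_zero m 0]
          rw [List.filter_map, Dix]
          simp [Function.comp_def]
        rw [← this, List.length_map]
      have hsplit : Dix m p
          = (PySem.List.pyRange 0 k).filter
              (fun j => PySem.Int.mod (PySem.List.pyGetD m j 0) p == 0)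
            ++ (PySem.List.pyRange k (PySem.List.len m)).filter
              (fun j => PySem.Int.mod (PySem.List.pyGetD m j 0) p == 0) := by
        rw [Dix, PySem.List.pyRange_one_append 0 k (PySem.List.len m) (by omega) (by simp; omega),
            List.filter_append]
      have hcle : (PySem.List.pyRange 0 k).countP
            (fun j => PySem.Int.mod (PySem.List.pyGetD m j 0) p == 0)
          ≤ (m.filter (fun v => PySem.Int.mod v p == 0)).length := by
        rw [← hLD, hsplit, List.length_append, List.countP_eq_length_filter]
        omega
      refine Eq.trans (popLoop (fun j => PySem.Set.contains (Dix m p) j)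
            (fun j => PySem.List.pyGetD m j 0) (PySem.List.pyRange 0 k)
            (PySem.List.sorted (m.filter (fun v => PySem.Int.mod v p == 0)) (fun x => x) false) 0
            (by rw [PySem.List.length_sorted, hcg]; exact hcle)) ?_
      refine Eq.trans ?_ (maxLoop (fun j => PySem.Int.mod (PySem.List.pyGetD m j 0) p == 0)
        (fun j => PySem.List.pyGetD m j 0) (PySem.List.pyRange 0 k)
        (m.filter (fun v => PySem.Int.mod v p == 0)) 0 hcle).symm
      have hflt : (PySem.List.pyRange 0 k).filter
            (fun j => !(PySem.Set.contains (Dix m p) j))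
          = (PySem.List.pyRange 0 k).filter
            (fun j => !(PySem.Int.mod (PySem.List.pyGetD m j 0) p == 0)) := by
        apply List.filter_congr
        intro j hj
        rw [hgq j hj]
      rw [hflt, hcg, PySem.List.length_sorted]
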